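-- pv_equiv track=rewrite | github.com/Irash-Gilani/Irash-ICS4UO | Assignment1.py | matshift
-- ===== SOURCE A (Python) =====
-- def matshift(matrix, shiftval):
--   shiftmat = []
--   shiftby = 0
--
--   for rownum in range(len(matrix)):
--     shiftedvalarr = []
--     for val in range(len(matrix)):
--       shiftedval = 0
--       shift = (val + shiftby) % (len(matrix))
--       shiftedval = matrix[shift]
--       shiftedvalarr.append(shiftedval)
--     shiftmat.append(shiftedvalarr)
--
--     shiftby += shiftval
--
--   return shiftmat
-- ===== SOURCE B (Python) =====
-- def matshift(matrix, shiftval):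
--   n = len(matrix)
--   result = []
--   for r in range(n):
--     s = (r * shiftval) % n
--     result.append(list(matrix[s:]) + list(matrix[:s]))
--   return result
-- ===== Notes on version B (the rewrite author's own statement) =====
-- stated objective: simpler
-- what changed: Each row is built in O(1) slice operations as a left rotation (matrix[s:] + matrix[:s] with s = (r*shiftval) % n), replacing A's per-element modular-index inner loop and its running shiftby accumulator.
import Mathlib
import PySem

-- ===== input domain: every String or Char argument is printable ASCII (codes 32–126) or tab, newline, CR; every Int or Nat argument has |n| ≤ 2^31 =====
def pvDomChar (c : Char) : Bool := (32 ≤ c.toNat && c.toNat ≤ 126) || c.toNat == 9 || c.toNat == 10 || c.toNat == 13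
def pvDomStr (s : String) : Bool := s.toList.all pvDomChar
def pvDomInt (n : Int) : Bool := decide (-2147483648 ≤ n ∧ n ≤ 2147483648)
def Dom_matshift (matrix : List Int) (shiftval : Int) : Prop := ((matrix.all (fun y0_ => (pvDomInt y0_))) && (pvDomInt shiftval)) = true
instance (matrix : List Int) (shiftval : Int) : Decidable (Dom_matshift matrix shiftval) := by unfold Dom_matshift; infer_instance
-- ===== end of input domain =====

-- B builds each row by two slices (a left rotation) instead of A's per-element modular indexing with a running shiftby accumulator; objective: simpler.

-- ===== PORT A =====
-- literal transliteration of A: outer loop over range(len(matrix)) carrying (shiftmat, shiftby),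
-- inner loop appending matrix[(val + shiftby) % len(matrix)]; the index is a Python '%' by
-- len(matrix) > 0 whenever the loop body runs, so matrix[shift] never raises (pyGetD is exact here).
def matshift (matrix : List Int) (shiftval : Int) : List (List Int) :=
  ((PySem.List.pyRange 0 matrix.length 1).foldl
    (fun (st : List (List Int) × Int) _rownum =>
      (st.1 ++ [(PySem.List.pyRange 0 matrix.length 1).foldl
          (fun acc val =>
            acc ++ [PySem.List.pyGetD matrix (PySem.Int.mod (val + st.2) matrix.length) 0]) []],
       st.2 + shiftval))
    ([], 0)).1

-- ===== PORT B =====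
-- row r = matrix[s:] + matrix[:s] with s = (r * shiftval) % len(matrix)
def matshift_alt (matrix : List Int) (shiftval : Int) : List (List Int) :=
  (PySem.List.pyRange 0 matrix.length 1).map (fun r =>
    PySem.List.slice matrix (some (PySem.Int.mod (r * shiftval) matrix.length)) none
      ++ PySem.List.slice matrix none (some (PySem.Int.mod (r * shiftval) matrix.length)))

-- ===== PRECONDITION & SPEC =====
def Spec_matshift (matrix : List Int) (shiftval : Int) (out : List (List Int)) : Prop := out = matshift_alt matrix shiftval
instance (matrix : List Int) (shiftval : Int) (out : List (List Int)) : Decidable (Spec_matshift matrix shiftval out) := by unfold Spec_matshift; infer_instance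

-- ===== CLAIM (what is proved, stated in full; the proofs are below) =====
def Claim_equal_matshift : Prop := ∀ (matrix : List Int) (shiftval : Int), Dom_matshift matrix shiftval → Spec_matshift matrix shiftval (matshift matrix shiftval)

-- ===== LEMMAS AND PROOFS =====

-- a foldl that only snocs is a map
theorem foldl_snoc_map {α β : Type} (f : α → β) (l : List α) (acc : List β) :
    l.foldl (fun a x => a ++ [f x]) acc = acc ++ l.map f := by
  induction l generalizing acc with
  | nil => simp
  | cons x xs ih => simp [ih]

-- A's outer loop: the running shift at step i is b + i*shiftval (specialised to A's body to keep rewriting first-order)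
theorem matshiftA_fold (matrix : List Int) (shiftval : Int) (l : List Int)
    (acc : List (List Int)) (b : Int) :
    (l.foldl
      (fun (st : List (List Int) × Int) _rownum =>
        (st.1 ++ [(PySem.List.pyRange 0 matrix.length 1).foldl
            (fun acc2 val =>
              acc2 ++ [PySem.List.pyGetD matrix (PySem.Int.mod (val + st.2) matrix.length) 0]) []],
         st.2 + shiftval))
      (acc, b)).1
    = acc ++ (List.range l.length).map (fun (i : Nat) =>
        (PySem.List.pyRange 0 matrix.length 1).foldl
          (fun acc2 val =>
            acc2 ++ [PySem.List.pyGetD matrix (PySem.Int.mod (val + (b + (i : Int) * shiftval)) matrix.length) 0]) []) := by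
  induction l generalizing acc b with
  | nil => simp
  | cons x xs ih =>
    simp only [List.foldl_cons, ih, List.length_cons, List.range_succ_eq_map, List.map_cons,
      List.map_map]
    simp only [Nat.cast_zero, zero_mul, add_zero, List.append_assoc, List.singleton_append]
    congr 2
    refine List.map_congr_left (fun i _ => ?_)
    have h : b + shiftval + (i : Int) * shiftval = b + ((i + 1 : Nat) : Int) * shiftval := by
      push_cast; ring
    simp only [Function.comp_apply, Nat.succ_eq_add_one, h]

-- rotation by t: element-wise modular indexing equals drop/take
theorem rot_eq (xs : List Int) (t : Nat) (ht : t < xs.length) :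
    (List.range xs.length).map (fun k => xs.getD ((k + t) % xs.length) 0)
      = xs.drop t ++ xs.take t := by
  apply List.ext_getElem
  · simp; omega
  · intro i h1 h2
    have hi : i < xs.length := by simpa using h1
    rw [List.getElem_map, List.getElem_range]
    by_cases hc : i + t < xs.length
    · have hmod : (i + t) % xs.length = i + t := Nat.mod_eq_of_lt hc
      rw [hmod, List.getElem_append_left (by simp; omega)]
      rw [List.getElem_drop, List.getD_eq_getElem _ _ hc]
      congr 1
      omega
    · have hmod : (i + t) % xs.length = i + t - xs.length := by
        have h3 : (i + t) % xs.length = (i + t - xs.length) % xs.length := by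
          rw [Nat.mod_eq_sub_mod (by omega)]
        rw [h3, Nat.mod_eq_of_lt (by omega)]
      rw [hmod, List.getElem_append_right (by simp; omega)]
      rw [List.getElem_take, List.getD_eq_getElem _ _ (by omega)]
      congr 1
      simp
      omega

-- one row: A's modular-index row at running shift b equals B's slice concatenation at s = b % n
theorem row_eq (matrix : List Int) (b : Int) (hn : 0 < matrix.length) :
    (List.range matrix.length).map
        (fun (k : Nat) => PySem.List.pyGetD matrix (PySem.Int.mod ((k : Int) + b) matrix.length) 0)
      = PySem.List.slice matrix (some (PySem.Int.mod b matrix.length)) none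
          ++ PySem.List.slice matrix none (some (PySem.Int.mod b matrix.length)) := by
  have hpos : (0 : Int) < (matrix.length : Int) := by exact_mod_cast hn
  have hs0 : 0 ≤ PySem.Int.mod b matrix.length := PySem.Int.mod_nonneg _ hpos
  have hslt : PySem.Int.mod b matrix.length < matrix.length := PySem.Int.mod_lt _ hpos
  have hts : (((PySem.Int.mod b matrix.length).toNat : Nat) : Int) = PySem.Int.mod b matrix.length :=
    Int.toNat_of_nonneg hs0
  have htlt : (PySem.Int.mod b matrix.length).toNat < matrix.length := by omega
  rw [PySem.List.slice_from _ hs0, PySem.List.slice_to _ hs0, ← rot_eq matrix _ htlt]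
  apply List.map_congr_left
  intro k hk
  have hmod : PySem.Int.mod ((k : Int) + b) matrix.length
      = (((k + (PySem.Int.mod b matrix.length).toNat) % matrix.length : Nat) : Int) := by
    rw [PySem.Int.mod_eq_emod_of_pos hpos]
    have h1 : ((k : Int) + b) % (matrix.length : Int)
        = ((k : Int) + ((PySem.Int.mod b matrix.length).toNat : Int)) % (matrix.length : Int) := by
      rw [hts, PySem.Int.mod_eq_emod_of_pos hpos, Int.add_emod ((k : Int)) (b % _),
        Int.emod_emod_of_dvd _ dvd_rfl, ← Int.add_emod]
    rw [h1]
    push_cast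
    rfl
  rw [hmod, PySem.List.pyGetD_natCast]

-- ===== VERDICT (by name: the statement is the Claim_ definition above) =====
theorem matshift_spec : Claim_equal_matshift := by
  intro matrix shiftval _
  unfold Spec_matshift
  rcases Nat.eq_zero_or_pos matrix.length with h0 | hn
  · obtain rfl : matrix = [] := List.length_eq_zero_iff.mp h0
    rfl
  · unfold matshift matshift_alt
    rw [matshiftA_fold, List.nil_append, PySem.List.pyRange_zero_nat]
    simp only [List.length_map, List.length_range, List.map_map]
    refine List.map_congr_left (fun i _ => ?_)
    simp only [Function.comp_apply]
    rw [foldl_snoc_map, List.nil_append, List.map_map]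
    have hr := row_eq matrix ((i : Int) * shiftval) hn
    simpa [Function.comp, zero_add] using hr
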